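-- pv_equiv track=rewrite | github.com/taylor26500/PlaylistPal | main_ori.py | convert_raw_headers_to_auth
-- ===== SOURCE A (Python) =====
-- def convert_raw_headers_to_auth(raw_headers, cookie):
--     """Convert raw headers text to the required authentication format"""
--     headers_dict = {}
--
--     current_key = None
--     current_value = []
--
--     # Split the raw headers into lines
--     lines = raw_headers.strip().split('\n')
--
--     for line in lines:
--         line = line.strip()
--         if ':' in line:
--             # If we have a stored key and value, save it before processing new one
--             if current_key and current_value:
--                 headers_dict[current_key.lower()] = ' '.join(current_value)
--
--             # Split at first occurrence of ':' as header values might contain ':'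
--             key, value = line.split(':', 1)
--             key = key.strip()
--             value = value.strip()
--
--             # Skip protocol-specific headers (those starting with ':')
--             if key.startswith(':'):
--                 current_key = None
--                 current_value = []
--                 continue
--
--             current_key = key
--             current_value = [value] if value else []
--         elif line and current_key:  # Continue previous header value
--             current_value.append(line)
--
--     # Save the last header if exists
--     if current_key and current_value:
--         headers_dict[current_key.lower()] = ' '.join(current_value)
--
--     # Create the required headers format
--     auth_headers = {
--         "accept": headers_dict.get("accept", "*/*"),
--         "accept-language": headers_dict.get("accept-language", "en-US,en;q=0.9"),
--         "authorization": headers_dict.get("authorization", ""),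
--         "cookie": cookie.replace("\n", ""),
--         "user-agent": headers_dict.get("user-agent", ""),
--         "x-goog-authuser": headers_dict.get("x-goog-authuser", "0"),
--         "x-origin": headers_dict.get("origin", "https://music.youtube.com")
--     }
--
--     return auth_headers
-- ===== SOURCE B (Python) =====
-- def convert_raw_headers_to_auth(raw_headers, cookie):
--     """Convert raw headers text to the required authentication format"""
--     # Single BACKWARD pass: scan the lines from last to first, buffering
--     # continuation lines until their header line appears; insert first-wins
--     # (the last occurrence in the original text), so no last-wins overwriting
--     # and no pending-header save logic is needed.
--     found = {}
--     tail = []  # continuation lines seen since the last header line, reversed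
--     for line in reversed(raw_headers.strip().split('\n')):
--         line = line.strip()
--         if ':' in line:
--             key, value = line.split(':', 1)
--             key = key.strip().lower()
--             value = value.strip()
--             parts = ([value] if value else []) + tail[::-1]
--             if key and parts and key not in found:
--                 found[key] = ' '.join(parts)
--             tail = []
--         elif line:
--             tail.append(line)
--
--     return {
--         "accept": found.get("accept", "*/*"),
--         "accept-language": found.get("accept-language", "en-US,en;q=0.9"),
--         "authorization": found.get("authorization", ""),
--         "cookie": cookie.replace("\n", ""),
--         "user-agent": found.get("user-agent", ""),
--         "x-goog-authuser": found.get("x-goog-authuser", "0"),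
--         "x-origin": found.get("origin", "https://music.youtube.com"),
--     }
-- ===== Notes on version B (the rewrite author's own statement) =====
-- stated objective: alternative
-- what changed: A's forward state machine (pending current_key/current_value saved last-wins into a dict, with duplicated save logic and a dead startswith(':') branch) is replaced by a single backward pass over the lines: continuation lines are buffered until their header line appears and each completed header is inserted first-wins, so no pending-header save step and no overwriting ever happen.
import Mathlib
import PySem

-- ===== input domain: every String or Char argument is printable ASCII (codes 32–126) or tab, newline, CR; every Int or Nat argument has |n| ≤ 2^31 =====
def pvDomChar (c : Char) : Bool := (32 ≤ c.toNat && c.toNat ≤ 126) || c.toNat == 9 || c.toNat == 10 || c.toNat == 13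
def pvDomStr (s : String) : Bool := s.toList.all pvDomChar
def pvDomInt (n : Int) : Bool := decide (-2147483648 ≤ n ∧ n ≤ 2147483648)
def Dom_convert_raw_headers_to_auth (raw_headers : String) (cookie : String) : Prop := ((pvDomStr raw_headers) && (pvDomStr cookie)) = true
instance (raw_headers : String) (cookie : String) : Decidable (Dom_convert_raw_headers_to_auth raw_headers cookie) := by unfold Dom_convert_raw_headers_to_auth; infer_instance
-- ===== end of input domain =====

-- B replaces A's forward state machine (pending key/value saved last-wins into a dict) by a
-- single BACKWARD pass: scan the lines last-to-first, buffer continuation lines until their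
-- header line appears, and insert first-wins (objective: alternative traversal order).

-- ===== PORT A =====
-- A's state: headers_dict, current_key, current_value.  Python's current_key is None or a
-- string; A only ever tests its truthiness (None and "" are both falsy) and lowers it when
-- truthy, so it is ported as a String with "" standing for None.
def pvAStep (st : PySem.Dict String String × String × List String) (line0 : String) :
    PySem.Dict String String × String × List String :=
  let line := PySem.Str.strip line0
  let d := st.1
  let ck := st.2.1
  let cv := st.2.2
  if PySem.Str.isIn ":" line then
    -- save the pending header, then split at the first ':'
    let d := if ck ≠ "" ∧ cv ≠ [] then d.insert (PySem.Str.lower ck) (PySem.Str.join " " cv) else d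
    match PySem.Str.splitMax? line ":" 1 with
    | some [k0, v0] =>
      let key := PySem.Str.strip k0
      let value := PySem.Str.strip v0
      if PySem.Str.startswith key ":" then (d, "", [])
      else (d, key, if value ≠ "" then [value] else [])
    | _ => (d, ck, cv)   -- unreachable: ':' in line gives exactly two parts
  else if line ≠ "" ∧ ck ≠ "" then (d, ck, cv ++ [line])
  else (d, ck, cv)

def convert_raw_headers_to_auth (raw_headers : String) (cookie : String) : List (String × String) :=
  let lines := (PySem.Str.split? (PySem.Str.strip raw_headers) "\n").getD []   -- sep ≠ "": never none
  let st := lines.foldl pvAStep (PySem.Dict.empty, "", [])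
  let d := if st.2.1 ≠ "" ∧ st.2.2 ≠ [] then st.1.insert (PySem.Str.lower st.2.1) (PySem.Str.join " " st.2.2) else st.1
  [("accept", d.getD "accept" "*/*"),
   ("accept-language", d.getD "accept-language" "en-US,en;q=0.9"),
   ("authorization", d.getD "authorization" ""),
   ("cookie", PySem.Str.replace cookie "\n" ""),
   ("user-agent", d.getD "user-agent" ""),
   ("x-goog-authuser", d.getD "x-goog-authuser" "0"),
   ("x-origin", d.getD "origin" "https://music.youtube.com")]

-- ===== PORT B =====
-- One backward step: state (found, tail); tail holds the continuation lines seen since the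
-- last header line (in reverse); a header line takes them and inserts first-wins.
def pvRevStep (st : PySem.Dict String String × List String) (line0 : String) :
    PySem.Dict String String × List String :=
  let line := PySem.Str.strip line0
  if PySem.Str.isIn ":" line then
    match PySem.Str.splitMax? line ":" 1 with
    | some [k0, v0] =>
      let key := PySem.Str.lower (PySem.Str.strip k0)
      let value := PySem.Str.strip v0
      let parts := (if value ≠ "" then [value] else []) ++ st.2.reverse
      if key ≠ "" ∧ parts ≠ [] ∧ st.1.get? key = none
      then (st.1.insert key (PySem.Str.join " " parts), [])
      else (st.1, [])
    | _ => st   -- unreachable: ':' in line gives exactly two parts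
  else if line ≠ "" then (st.1, st.2 ++ [line]) else st

def convert_raw_headers_to_auth_alt (raw_headers : String) (cookie : String) : List (String × String) :=
  let lines := (PySem.Str.split? (PySem.Str.strip raw_headers) "\n").getD []   -- sep ≠ "": never none
  let found := (lines.reverse.foldl pvRevStep (PySem.Dict.empty, [])).1
  [("accept", found.getD "accept" "*/*"),
   ("accept-language", found.getD "accept-language" "en-US,en;q=0.9"),
   ("authorization", found.getD "authorization" ""),
   ("cookie", PySem.Str.replace cookie "\n" ""),
   ("user-agent", found.getD "user-agent" ""),
   ("x-goog-authuser", found.getD "x-goog-authuser" "0"),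
   ("x-origin", found.getD "origin" "https://music.youtube.com")]

-- ===== PRECONDITION & SPEC =====
def Spec_convert_raw_headers_to_auth (raw_headers : String) (cookie : String) (out : List (String × String)) : Prop := out = convert_raw_headers_to_auth_alt raw_headers cookie
instance (raw_headers : String) (cookie : String) (out : List (String × String)) : Decidable (Spec_convert_raw_headers_to_auth raw_headers cookie out) := by unfold Spec_convert_raw_headers_to_auth; infer_instance

-- ===== CLAIM (what is proved, stated in full; the proofs are below) =====
def Claim_equal_convert_raw_headers_to_auth : Prop := ∀ (raw_headers : String) (cookie : String), Dom_convert_raw_headers_to_auth raw_headers cookie → Spec_convert_raw_headers_to_auth raw_headers cookie (convert_raw_headers_to_auth raw_headers cookie)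

-- ===== LEMMAS AND PROOFS =====

-- Proof-only middleman: the list of logical-header records A's forward pass groups the lines
-- into.  A's loop builds the dict of these records last-wins; B's backward loop builds the
-- dict of these records (reversed) first-wins; both give the same lookups.
def pvBStep (records : List (String × List String)) (line0 : String) : List (String × List String) :=
  let line := PySem.Str.strip line0
  if PySem.Str.isIn ":" line then
    match PySem.Str.splitMax? line ":" 1 with
    | some [k0, v0] =>
      let k := PySem.Str.strip k0
      let v := PySem.Str.strip v0
      records ++ [(k, if v ≠ "" then [v] else [])]
    | _ => records
  else
    match records.getLast? with
    | some (k, parts) =>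
      if line ≠ "" ∧ k ≠ "" then records.dropLast ++ [(k, parts ++ [line])]
      else records
    | none => records

-- first record (front to back) with a non-empty key, non-empty parts and this lowercased key
def pvFirst : List (String × List String) → String → Option String
  | [], _ => none
  | (k, parts) :: rest, name =>
      if k ≠ "" ∧ parts ≠ [] ∧ PySem.Str.lower k = name then some (PySem.Str.join " " parts)
      else pvFirst rest name

-- the stripped non-empty leading continuation lines (before the first ':' line)
def pvLead (lines : List String) : List String :=
  ((lines.map PySem.Str.strip).takeWhile (fun l => !(PySem.Str.isIn ":" l))).filter (fun l => !(l == ""))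

-- the dictionary A's loop builds, expressed over the records
def pvDictOf (records : List (String × List String)) : PySem.Dict String String :=
  records.foldl
    (fun d r => if r.1 ≠ "" ∧ r.2 ≠ [] then d.insert (PySem.Str.lower r.1) (PySem.Str.join " " r.2) else d)
    PySem.Dict.empty

-- the coupling invariant between A's loop state and the record list
def pvRel (st : PySem.Dict String String × String × List String) (records : List (String × List String)) : Prop :=
  (records = [] ∧ st = (PySem.Dict.empty, "", []))
  ∨ (∃ init k p, records = init ++ [(k, p)] ∧ st = (pvDictOf init, k, p))

-- splitOnMax.go with maxsplit exhausted swallows the rest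
theorem pvGo0 (fuel : Nat) (cs : List Char) (acc : List (List Char)) :
    PySem.Chars.splitOnMax.go [':'] fuel 0 cs [] acc = (cs :: acc).reverse := by
  cases fuel with
  | zero => simp [PySem.Chars.splitOnMax.go]
  | succ f => cases cs with
    | nil => simp [PySem.Chars.splitOnMax.go]
    | cons c rest => simp [PySem.Chars.splitOnMax.go]

-- characterisation of splitOnMax.go for sep ':' and maxsplit 1
theorem pvGo1 (cs : List Char) : ∀ (fuel : Nat) (cur : List Char) (acc : List (List Char)),
    cs.length < fuel →
    PySem.Chars.splitOnMax.go [':'] fuel 1 cs cur acc =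
      if ':' ∈ cs
      then acc.reverse ++ [cur.reverse ++ cs.takeWhile (· != ':'), (cs.dropWhile (· != ':')).drop 1]
      else acc.reverse ++ [cur.reverse ++ cs] := by
  induction cs with
  | nil =>
    intro fuel cur acc hf
    cases fuel with
    | zero => omega
    | succ f => simp [PySem.Chars.splitOnMax.go]
  | cons c rest ih =>
    intro fuel cur acc hf
    cases fuel with
    | zero => omega
    | succ f =>
      have hlt : rest.length < f := by
        simp only [List.length_cons] at hf; omega
      have hc2 : ∀ x : Char, ¬ x = ':' → ¬ ':' = x := fun _ h h2 => h h2.symm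
      by_cases hc : c = ':'
      · subst hc
        rw [show PySem.Chars.splitOnMax.go [':'] (f+1) 1 (':'::rest) cur acc
              = PySem.Chars.splitOnMax.go [':'] f 0 rest [] (cur.reverse :: acc) from by
            simp [PySem.Chars.splitOnMax.go, List.isPrefixOf]]
        rw [pvGo0]
        simp
      · rw [show PySem.Chars.splitOnMax.go [':'] (f+1) 1 (c::rest) cur acc
              = PySem.Chars.splitOnMax.go [':'] f 1 rest (c::cur) acc from by
            simp [PySem.Chars.splitOnMax.go, List.isPrefixOf, Ne.symm hc]]
        rw [ih f (c::cur) acc hlt]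
        have hbne : (c != ':') = true := by simp [hc]
        by_cases hm : ':' ∈ rest
        · simp [hm, hbne, hc2 c hc]
        · simp [hm, hc2 c hc]

-- splitting a line that contains ':' at its first ':'
theorem pvSplit_colon (s : String) (h : PySem.Str.isIn ":" s = true) :
    PySem.Str.splitMax? s ":" 1 =
      some [String.ofList (s.toList.takeWhile (· != ':')),
            String.ofList ((s.toList.dropWhile (· != ':')).drop 1)] := by
  have hmem : ':' ∈ s.toList := by
    rw [PySem.Str.isIn_iff_infix, show (":" : String).toList = [':'] from rfl] at h
    exact h.subset (by simp)
  have hc : PySem.Chars.splitMax? s.toList [':'] 1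
      = some [s.toList.takeWhile (· != ':'), (s.toList.dropWhile (· != ':')).drop 1] := by
    rw [PySem.Chars.splitMax?, if_neg (by simp), PySem.Chars.splitOnMax, if_neg (by norm_num)]
    rw [show (1 : Int).toNat = 1 from rfl]
    rw [pvGo1 s.toList (s.toList.length + 1) [] [] (by omega)]
    simp [hmem]
  unfold PySem.Str.splitMax?
  rw [show (":" : String).toList = [':'] from rfl, hc]
  simp

-- stripped characters come from the original list
theorem pvMem_strip {x : Char} {cs : List Char} (h : x ∈ PySem.Chars.strip cs) : x ∈ cs := by
  simp only [PySem.Chars.strip, PySem.Chars.rstrip, PySem.Chars.lstrip] at h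
  rw [List.mem_reverse] at h
  have h1 := (List.dropWhile_sublist (l := (List.dropWhile PySem.Chars.isspace cs).reverse)
    (p := PySem.Chars.isspace)).mem h
  rw [List.mem_reverse] at h1
  exact (List.dropWhile_sublist (l := cs) (p := PySem.Chars.isspace)).mem h1

-- the dead branch: the key part of the split never starts with ':'
theorem pvKey_no_colon (s : String) :
    PySem.Str.startswith (PySem.Str.strip (String.ofList (s.toList.takeWhile (· != ':')))) ":" = false := by
  by_contra hb
  rw [Bool.not_eq_false] at hb
  simp only [PySem.Str.startswith] at hb
  rw [PySem.Chars.startswith_iff] at hb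
  have hmem : ':' ∈ (PySem.Str.strip (String.ofList (s.toList.takeWhile (· != ':')))).toList := by
    have : (":" : String).toList = [':'] := rfl
    rw [this] at hb
    exact hb.subset (by simp)
  rw [PySem.Str.toList_strip, String.toList_ofList] at hmem
  have := List.mem_takeWhile_imp (pvMem_strip hmem)
  simp at this

-- the stripped key and value parts of a ':' line (proof-only abbreviations)
def pvK (l : String) : String :=
  PySem.Str.strip (String.ofList ((PySem.Str.strip l).toList.takeWhile (· != ':')))
def pvV0 (l : String) : String :=
  PySem.Str.strip (String.ofList (((PySem.Str.strip l).toList.dropWhile (· != ':')).drop 1))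
def pvV (l : String) : List String := if pvV0 l ≠ "" then [pvV0 l] else []

-- lowering a string preserves emptiness
theorem pvLower_empty_iff (s : String) : PySem.Str.lower s = "" ↔ s = "" := by
  constructor
  · intro h
    have h2 := congrArg String.toList h
    rw [PySem.Str.toList_lower] at h2
    simp [PySem.Chars.lower] at h2
    exact String.toList_inj.mp (by simp [h2])
  · intro h; subst h; rfl

-- shape of one record-grouping step on a ':' line
theorem pvBStep_colon (X : List (String × List String)) (l : String)
    (h : PySem.Str.isIn ":" (PySem.Str.strip l) = true) :
    pvBStep X l = X ++ [(pvK l, pvV l)] := by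
  unfold pvBStep
  rw [if_pos h, pvSplit_colon _ h]
  rfl

-- shape of one record-grouping step on a non-':' line
theorem pvBStep_nil_noncolon (l : String) (h : PySem.Str.isIn ":" (PySem.Str.strip l) = false) :
    pvBStep [] l = [] := by
  unfold pvBStep
  rw [if_neg (by rw [h]; simp), List.getLast?_nil]

theorem pvBStep_snoc_noncolon (X : List (String × List String)) (k : String) (p : List String)
    (l : String) (h : PySem.Str.isIn ":" (PySem.Str.strip l) = false) :
    pvBStep (X ++ [(k, p)]) l
      = X ++ [(k, if PySem.Str.strip l ≠ "" ∧ k ≠ "" then p ++ [PySem.Str.strip l] else p)] := by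
  unfold pvBStep
  rw [if_neg (by rw [h]; simp), List.getLast?_concat]
  dsimp only
  by_cases hck : PySem.Str.strip l ≠ "" ∧ k ≠ ""
  · rw [if_pos hck, if_pos hck, List.dropLast_concat]
  · rw [if_neg hck, if_neg hck]

-- shape of one backward step on a ':' line
theorem pvRevStep_colon (st : PySem.Dict String String × List String) (l : String)
    (h : PySem.Str.isIn ":" (PySem.Str.strip l) = true) :
    pvRevStep st l =
      if PySem.Str.lower (pvK l) ≠ "" ∧ (pvV l ++ st.2.reverse) ≠ []
          ∧ st.1.get? (PySem.Str.lower (pvK l)) = none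
      then (st.1.insert (PySem.Str.lower (pvK l)) (PySem.Str.join " " (pvV l ++ st.2.reverse)), [])
      else (st.1, []) := by
  unfold pvRevStep
  rw [if_pos h, pvSplit_colon _ h]
  rfl

theorem pvRevStep_colon_pos (st : PySem.Dict String String × List String) (l : String)
    (h : PySem.Str.isIn ":" (PySem.Str.strip l) = true)
    (hc : PySem.Str.lower (pvK l) ≠ "" ∧ (pvV l ++ st.2.reverse) ≠ []
          ∧ st.1.get? (PySem.Str.lower (pvK l)) = none) :
    pvRevStep st l
      = (st.1.insert (PySem.Str.lower (pvK l)) (PySem.Str.join " " (pvV l ++ st.2.reverse)), []) := by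
  rw [pvRevStep_colon st l h, if_pos hc]

theorem pvRevStep_colon_neg (st : PySem.Dict String String × List String) (l : String)
    (h : PySem.Str.isIn ":" (PySem.Str.strip l) = true)
    (hc : ¬ (PySem.Str.lower (pvK l) ≠ "" ∧ (pvV l ++ st.2.reverse) ≠ []
          ∧ st.1.get? (PySem.Str.lower (pvK l)) = none)) :
    pvRevStep st l = (st.1, []) := by
  rw [pvRevStep_colon st l h, if_neg hc]

-- pvFirst on a single record
theorem pvFirst_single (k : String) (p : List String) (name : String) :
    pvFirst [(k, p)] name
      = if k ≠ "" ∧ p ≠ [] ∧ PySem.Str.lower k = name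
        then some (PySem.Str.join " " p) else none := rfl

-- shape of one backward step on a non-':' line
theorem pvRevStep_noncolon (st : PySem.Dict String String × List String) (l : String)
    (h : PySem.Str.isIn ":" (PySem.Str.strip l) = false) :
    pvRevStep st l = if PySem.Str.strip l ≠ "" then (st.1, st.2 ++ [PySem.Str.strip l]) else st := by
  unfold pvRevStep
  rw [if_neg (by rw [h]; simp)]

-- pvLead over a cons
theorem pvLead_cons (l : String) (rest : List String) :
    pvLead (l :: rest)
      = if PySem.Str.isIn ":" (PySem.Str.strip l) then []
        else if PySem.Str.strip l ≠ "" then PySem.Str.strip l :: pvLead rest else pvLead rest := by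
  unfold pvLead
  by_cases h : PySem.Str.isIn ":" (PySem.Str.strip l) = true
  · have h' : PySem.Chars.isIn [':'] (PySem.Chars.strip l.toList) = true := by
      have := h; simpa using this
    simp [h']
  · rw [Bool.not_eq_true] at h
    have h' : PySem.Chars.isIn [':'] (PySem.Chars.strip l.toList) = false := by
      have := h; simpa using this
    by_cases he : PySem.Str.strip l = ""
    · have he' : PySem.Chars.strip l.toList = [] := by
        have := congrArg String.toList he; simpa using this
      simp [he, show PySem.Chars.isIn [':'] ([] : List Char) = false from by decide]
    · simp [h', he]

-- Dict.getD through get?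
theorem pvGetD (d : PySem.Dict String String) (k dflt : String) :
    d.getD k dflt = (d.get? k).getD dflt := by
  simp [PySem.Dict.getD]

-- pvFirst over an append
theorem pvFirst_append (xs ys : List (String × List String)) (name : String) :
    pvFirst (xs ++ ys) name = (pvFirst xs name).or (pvFirst ys name) := by
  induction xs with
  | nil => simp [pvFirst]
  | cons r rest ih =>
    obtain ⟨k, p⟩ := r
    by_cases h : k ≠ "" ∧ p ≠ [] ∧ PySem.Str.lower k = name
    · simp [pvFirst, h]
    · simp only [List.cons_append, pvFirst, if_neg h]; exact ih

-- the dict A builds looks up as pvFirst on the reversed records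
theorem pvFirst_eq (records : List (String × List String)) (name : String) :
    (pvDictOf records).get? name = pvFirst records.reverse name := by
  induction records using List.reverseRecOn with
  | nil => simp [pvDictOf, pvFirst, PySem.Dict.get?, PySem.Dict.empty]
  | append_singleton init r ih =>
    rcases r with ⟨k, p⟩
    rw [pvDictOf, List.foldl_append]
    simp only [List.foldl_cons, List.foldl_nil]
    rw [List.reverse_append]
    simp only [List.reverse_cons, List.reverse_nil, List.nil_append, List.singleton_append]
    by_cases hv : k ≠ "" ∧ p ≠ []
    · rw [if_pos hv]
      by_cases hn : PySem.Str.lower k = name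
      · rw [pvFirst, if_pos ⟨hv.1, hv.2, hn⟩, hn, PySem.Dict.get?_insert_self]
      · rw [pvFirst, if_neg (by tauto), PySem.Dict.get?_insert,
            if_neg (fun hh => hn hh.symm)]
        exact ih
    · rw [if_neg hv, pvFirst, if_neg (by tauto)]
      exact ih

-- appending one record to the dictionary fold
theorem pvDictOf_append (init : List (String × List String)) (k : String) (p : List String) :
    pvDictOf (init ++ [(k, p)])
      = if k ≠ "" ∧ p ≠ [] then (pvDictOf init).insert (PySem.Str.lower k) (PySem.Str.join " " p)
        else pvDictOf init := by
  rw [pvDictOf, pvDictOf, List.foldl_append]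
  simp

-- one A step preserves the coupling invariant
theorem pvStep_rel (st : PySem.Dict String String × String × List String)
    (records : List (String × List String)) (line0 : String) (h : pvRel st records) :
    pvRel (pvAStep st line0) (pvBStep records line0) := by
  obtain ⟨d, ck, cv⟩ := st
  unfold pvAStep pvBStep
  by_cases hcolon : PySem.Str.isIn ":" (PySem.Str.strip line0) = true
  · rw [if_pos hcolon, if_pos hcolon, pvSplit_colon _ hcolon]
    have hd : (if ck ≠ "" ∧ cv ≠ [] then
        d.insert (PySem.Str.lower ck) (PySem.Str.join " " cv) else d) = pvDictOf records := by
      rcases h with ⟨hr, hs⟩ | ⟨init, k, p, hr, hs⟩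
      · rw [Prod.mk.injEq, Prod.mk.injEq] at hs
        rw [hr, hs.1, hs.2.1, hs.2.2, if_neg (by simp)]
        rfl
      · rw [Prod.mk.injEq, Prod.mk.injEq] at hs
        rw [hr, hs.1, hs.2.1, hs.2.2, pvDictOf_append]
    simp only [hd, pvKey_no_colon]
    simp only [Bool.false_eq_true, if_false]
    exact Or.inr ⟨records, _, _, rfl, rfl⟩
  · rw [if_neg hcolon, if_neg hcolon]
    rcases h with ⟨hr, hs⟩ | ⟨init, k, p, hr, hs⟩
    · rw [Prod.mk.injEq, Prod.mk.injEq] at hs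
      subst hr
      rw [hs.1, hs.2.1, hs.2.2]
      rw [if_neg (by simp), List.getLast?_nil]
      exact Or.inl ⟨rfl, rfl⟩
    · rw [Prod.mk.injEq, Prod.mk.injEq] at hs
      subst hr
      rw [hs.1, hs.2.1, hs.2.2, List.getLast?_concat, List.dropLast_concat]
      dsimp only
      by_cases hck : PySem.Str.strip line0 ≠ "" ∧ k ≠ ""
      · rw [if_pos hck, if_pos hck]
        exact Or.inr ⟨init, k, p ++ [PySem.Str.strip line0], rfl, rfl⟩
      · rw [if_neg hck, if_neg hck]
        exact Or.inr ⟨init, k, p, rfl, rfl⟩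

-- the invariant holds after the whole loop
theorem pvFold_rel (lines : List String) (st : PySem.Dict String String × String × List String)
    (records : List (String × List String)) (h : pvRel st records) :
    pvRel (lines.foldl pvAStep st) (lines.foldl pvBStep records) := by
  induction lines generalizing st records with
  | nil => exact h
  | cons l rest ih =>
    rw [List.foldl_cons, List.foldl_cons]
    exact ih _ _ (pvStep_rel st records l h)

-- A's final dictionary is exactly pvDictOf of the records
theorem pvFinal_dict (lines : List String) :
    (if (lines.foldl pvAStep (PySem.Dict.empty, "", [])).2.1 ≠ ""
        ∧ (lines.foldl pvAStep (PySem.Dict.empty, "", [])).2.2 ≠ [] then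
      (lines.foldl pvAStep (PySem.Dict.empty, "", [])).1.insert
        (PySem.Str.lower (lines.foldl pvAStep (PySem.Dict.empty, "", [])).2.1)
        (PySem.Str.join " " (lines.foldl pvAStep (PySem.Dict.empty, "", [])).2.2)
     else (lines.foldl pvAStep (PySem.Dict.empty, "", [])).1)
    = pvDictOf (lines.foldl pvBStep []) := by
  have h := pvFold_rel lines (PySem.Dict.empty, "", []) [] (Or.inl ⟨rfl, rfl⟩)
  rcases h with ⟨hr, hs⟩ | ⟨init, k, p, hr, hs⟩
  · rw [hr, hs, if_neg (by simp)]
    rfl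
  · rw [hr, hs, pvDictOf_append]

-- the record fold never touches a non-empty prefix
theorem pvRec_append (rest : List String) : ∀ (init : List (String × List String)) (k : String) (p : List String),
    List.foldl pvBStep (init ++ [(k, p)]) rest = init ++ List.foldl pvBStep [(k, p)] rest := by
  induction rest with
  | nil => intro init k p; rfl
  | cons l rest ih =>
    intro init k p
    rw [List.foldl_cons, List.foldl_cons]
    by_cases hcolon : PySem.Str.isIn ":" (PySem.Str.strip l) = true
    · rw [pvBStep_colon _ _ hcolon, pvBStep_colon [(k, p)] _ hcolon,
          show init ++ [(k, p)] ++ [(pvK l, pvV l)] = (init ++ [(k, p)]) ++ [(pvK l, pvV l)] from rfl,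
          ih (init ++ [(k, p)]), show ([(k, p)] ++ [(pvK l, pvV l)] : List _) = [(k, p)] ++ [(pvK l, pvV l)] from rfl,
          ih [(k, p)], List.append_assoc]
    · rw [Bool.not_eq_true] at hcolon
      rw [pvBStep_snoc_noncolon _ _ _ _ hcolon,
          show ([(k, p)] : List (String × List String)) = [] ++ [(k, p)] from rfl,
          pvBStep_snoc_noncolon [] _ _ _ hcolon]
      simp only [List.nil_append]
      exact ih init k _

-- records of lines starting with a header record
theorem pvRec_cons (rest : List String) : ∀ (k : String) (p : List String),
    List.foldl pvBStep [(k, p)] rest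
      = (k, p ++ (if k ≠ "" then pvLead rest else [])) :: List.foldl pvBStep [] rest := by
  induction rest with
  | nil =>
    intro k p
    by_cases hk : k ≠ "" <;> simp [pvLead, hk]
  | cons l rest ih =>
    intro k p
    rw [List.foldl_cons, List.foldl_cons, pvLead_cons]
    by_cases hcolon : PySem.Str.isIn ":" (PySem.Str.strip l) = true
    · rw [pvBStep_colon _ _ hcolon, pvBStep_colon [] _ hcolon, List.nil_append,
          show ([(k, p)] ++ [(pvK l, pvV l)] : List _) = [(k, p)] ++ [(pvK l, pvV l)] from rfl,
          pvRec_append rest [(k, p)], if_pos hcolon]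
      by_cases hk : k ≠ "" <;> simp [hk]
    · rw [Bool.not_eq_true] at hcolon
      rw [show ([(k, p)] : List (String × List String)) = [] ++ [(k, p)] from rfl,
          pvBStep_snoc_noncolon [] _ _ _ hcolon, List.nil_append,
          pvBStep_nil_noncolon _ hcolon, ih,
          if_neg (show ¬ PySem.Str.isIn ":" (PySem.Str.strip l) = true from by rw [hcolon]; simp)]
      by_cases hk : k ≠ "" <;> by_cases hl : PySem.Str.strip l ≠ "" <;> simp [hk, hl]

-- MAIN INVARIANT of B's backward loop
set_option maxHeartbeats 1000000 in
theorem pvInv (lines : List String) :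
    (lines.reverse.foldl pvRevStep (PySem.Dict.empty, [])).2 = (pvLead lines).reverse
    ∧ ∀ name, (lines.reverse.foldl pvRevStep (PySem.Dict.empty, [])).1.get? name
        = pvFirst (List.foldl pvBStep [] lines).reverse name := by
  induction lines with
  | nil => exact ⟨rfl, fun name => by simp [pvFirst, PySem.Dict.get?, PySem.Dict.empty]⟩
  | cons l rest ih =>
    obtain ⟨htail, hget⟩ := ih
    have hfold : (l :: rest).reverse.foldl pvRevStep (PySem.Dict.empty, [])
        = pvRevStep (rest.reverse.foldl pvRevStep (PySem.Dict.empty, [])) l := by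
      rw [List.reverse_cons, List.foldl_append, List.foldl_cons, List.foldl_nil]
    by_cases hcolon : PySem.Str.isIn ":" (PySem.Str.strip l) = true
    · -- header line: the first record of the records list is completed
      have hrecs : List.foldl pvBStep [] (l :: rest)
          = (pvK l, pvV l ++ (if pvK l ≠ "" then pvLead rest else [])) :: List.foldl pvBStep [] rest := by
        rw [List.foldl_cons, pvBStep_colon [] _ hcolon, List.nil_append, pvRec_cons]
      rw [hfold]
      set st := rest.reverse.foldl pvRevStep (PySem.Dict.empty, []) with hst
      have hparts : pvV l ++ st.2.reverse = pvV l ++ pvLead rest := by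
        rw [htail, List.reverse_reverse]
      have hlead : pvLead (l :: rest) = [] := by
        rw [pvLead_cons, if_pos hcolon]
      by_cases hB : PySem.Str.lower (pvK l) ≠ "" ∧ (pvV l ++ st.2.reverse) ≠ []
          ∧ st.1.get? (PySem.Str.lower (pvK l)) = none
      · rw [pvRevStep_colon_pos st l hcolon hB]
        refine ⟨by rw [hlead]; rfl, fun name => ?_⟩
        rw [hrecs, List.reverse_cons, pvFirst_append, ← hget, pvFirst_single]
        have hk : pvK l ≠ "" := fun he => hB.1 (by rw [he]; rfl)
        have hpr_eq : pvV l ++ (if pvK l ≠ "" then pvLead rest else []) = pvV l ++ st.2.reverse := by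
          rw [if_pos hk]; exact hparts.symm
        rw [PySem.Dict.get?_insert]
        by_cases hn : name = PySem.Str.lower (pvK l)
        · rw [if_pos hn, if_pos ⟨hk, by rw [hpr_eq]; exact hB.2.1, hn.symm⟩, hn, hB.2.2,
              Option.none_or, hpr_eq]
        · rw [if_neg hn, if_neg (fun hc => hn hc.2.2.symm), Option.or_none]
      · rw [pvRevStep_colon_neg st l hcolon hB]
        refine ⟨by rw [hlead]; rfl, fun name => ?_⟩
        rw [hrecs, List.reverse_cons, pvFirst_append, ← hget, pvFirst_single]
        by_cases hn : name = PySem.Str.lower (pvK l)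
        · by_cases hk : pvK l = ""
          · rw [if_neg (fun hc => hc.1 hk), Option.or_none]
          · have hpr_eq : pvV l ++ (if pvK l ≠ "" then pvLead rest else []) = pvV l ++ st.2.reverse := by
              rw [if_pos hk]; exact hparts.symm
            by_cases hp : (pvV l ++ st.2.reverse) = []
            · rw [if_neg (fun hc => hc.2.1 (hpr_eq.trans hp)), Option.or_none]
            · push Not at hB
              have hk' : PySem.Str.lower (pvK l) ≠ "" := by
                rw [Ne, pvLower_empty_iff]; exact hk
              obtain ⟨v, hv⟩ := Option.ne_none_iff_exists'.mp (hB hk' hp)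
              rw [hn, hv]; rfl
        · rw [if_neg (fun hc => hn hc.2.2.symm), Option.or_none]
    · -- continuation / blank line
      rw [Bool.not_eq_true] at hcolon
      have hrecs : List.foldl pvBStep [] (l :: rest) = List.foldl pvBStep [] rest := by
        rw [List.foldl_cons, pvBStep_nil_noncolon _ hcolon]
      rw [hfold, pvRevStep_noncolon _ _ hcolon, pvLead_cons,
          if_neg (show ¬ PySem.Str.isIn ":" (PySem.Str.strip l) = true from by rw [hcolon]; simp), hrecs]
      by_cases hl : PySem.Str.strip l ≠ ""
      · exact ⟨by rw [if_pos hl]; dsimp only; rw [htail, if_pos hl]; simp,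
              fun name => by rw [if_pos hl]; exact hget name⟩
      · exact ⟨by rw [if_neg hl, htail, if_neg hl], fun name => by rw [if_neg hl]; exact hget name⟩

-- ===== VERDICT (by name: the statement is the Claim_ definition above) =====
theorem convert_raw_headers_to_auth_spec : Claim_equal_convert_raw_headers_to_auth := by
  intro raw_headers cookie _
  unfold Spec_convert_raw_headers_to_auth convert_raw_headers_to_auth convert_raw_headers_to_auth_alt
  simp only [pvFinal_dict, pvGetD, pvFirst_eq, (pvInv _).2]
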